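-- pv_equiv track=rewrite | github.com/CO12-Ir/match-length-prediction | functions.py | map_closure_reason_category
-- ===== SOURCE A (Python) =====
-- def map_closure_reason_category(reason):
--     if not isinstance(reason, str):
--         return 'Active'
--     r = reason.lower()
--     if any(x in r for x in [
--         "changed school", "moved", "workplace", "service area", "family structure"
--     ]):
--         return "Geographical Change"
--     elif "time constraint" in r or "time" in r:
--         return "Time"
--     elif "lost contact" in r:
--         return "Lost Contact"
--     elif "health" in r or "covid" in r or "deceased" in r:
--         return "Health Factor"
--     elif "successful" in r or "graduated" in r:
--         return "Success"
--     elif "incompatible" in r or "expectations" in r: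
--         return "Mismatch"
--     elif "infraction" in r or "safety" in r:
--         return "Rules Violation"
--     elif "agency" in r or "partnership" in r:
--         return "Agency Related"
--     elif "lost interest" in r or "severity of challenges" in r:
--         return "Lost Interest"
--     else:
--         return "Active"
-- ===== SOURCE B (Python) =====
-- PATTERN_PRIORITY = {
--     'changed school': 0, 'moved': 0, 'workplace': 0, 'service area': 0, 'family structure': 0,
--     'time constraint': 1, 'time': 1,
--     'lost contact': 2,
--     'health': 3, 'covid': 3, 'deceased': 3,
--     'successful': 4, 'graduated': 4,
--     'incompatible': 5, 'expectations': 5,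
--     'infraction': 6, 'safety': 6,
--     'agency': 7, 'partnership': 7,
--     'lost interest': 8, 'severity of challenges': 8,
-- }
--
-- CATEGORIES = ['Geographical Change', 'Time', 'Lost Contact', 'Health Factor',
--               'Success', 'Mismatch', 'Rules Violation', 'Agency Related', 'Lost Interest']
--
-- def map_closure_reason_category(reason):
--     if not isinstance(reason, str):
--         return 'Active'
--     r = reason.lower()
--     hits = [prio for pat, prio in PATTERN_PRIORITY.items() if pat in r]
--     return CATEGORIES[min(hits)] if hits else 'Active'
-- ===== Notes on version B (the rewrite author's own statement) =====
-- stated objective: alternative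
-- what changed: Replaces the ordered elif chain (first-match early exit) by a flat pattern->priority dict: B collects in one comprehension the priorities of ALL matching patterns and returns the category at the MINIMUM priority, so branch order disappears and the result is a min over a matched set.
import Mathlib
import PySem

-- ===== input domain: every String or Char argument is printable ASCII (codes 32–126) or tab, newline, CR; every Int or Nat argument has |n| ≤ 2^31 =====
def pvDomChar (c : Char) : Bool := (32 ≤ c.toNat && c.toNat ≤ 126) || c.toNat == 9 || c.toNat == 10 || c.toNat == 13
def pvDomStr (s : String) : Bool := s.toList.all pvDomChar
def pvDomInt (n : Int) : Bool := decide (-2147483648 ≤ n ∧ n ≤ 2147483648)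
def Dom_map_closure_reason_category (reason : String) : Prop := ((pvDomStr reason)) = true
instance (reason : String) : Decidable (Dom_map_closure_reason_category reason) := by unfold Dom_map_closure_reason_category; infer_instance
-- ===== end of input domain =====

-- B replaces the ordered elif chain by a flat pattern→priority map: it collects the priorities of all matching patterns and returns the category of minimum priority; alternative decomposition, same cost.


-- ===== PORT A =====
def map_closure_reason_category (reason : String) : String :=
  let r := PySem.Str.lower reason
  if (["changed school", "moved", "workplace", "service area", "family structure"].any
        (fun x => PySem.Str.isIn x r)) then "Geographical Change"
  else if PySem.Str.isIn "time constraint" r || PySem.Str.isIn "time" r then "Time"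
  else if PySem.Str.isIn "lost contact" r then "Lost Contact"
  else if PySem.Str.isIn "health" r || PySem.Str.isIn "covid" r || PySem.Str.isIn "deceased" r then "Health Factor"
  else if PySem.Str.isIn "successful" r || PySem.Str.isIn "graduated" r then "Success"
  else if PySem.Str.isIn "incompatible" r || PySem.Str.isIn "expectations" r then "Mismatch"
  else if PySem.Str.isIn "infraction" r || PySem.Str.isIn "safety" r then "Rules Violation"
  else if PySem.Str.isIn "agency" r || PySem.Str.isIn "partnership" r then "Agency Related"
  else if PySem.Str.isIn "lost interest" r || PySem.Str.isIn "severity of challenges" r then "Lost Interest"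
  else "Active"

-- ===== PORT B =====
-- B: flat pattern→priority dict; collect priorities of ALL matching patterns, answer = category of the minimum priority
def patternPriority : List (String × Nat) :=
  [("changed school", 0), ("moved", 0), ("workplace", 0), ("service area", 0), ("family structure", 0),
   ("time constraint", 1), ("time", 1),
   ("lost contact", 2),
   ("health", 3), ("covid", 3), ("deceased", 3),
   ("successful", 4), ("graduated", 4),
   ("incompatible", 5), ("expectations", 5),
   ("infraction", 6), ("safety", 6),
   ("agency", 7), ("partnership", 7),
   ("lost interest", 8), ("severity of challenges", 8)]

def categories : List String :=
  ["Geographical Change", "Time", "Lost Contact", "Health Factor",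
   "Success", "Mismatch", "Rules Violation", "Agency Related", "Lost Interest"]

def map_closure_reason_category_alt (reason : String) : String :=
  let r := PySem.Str.lower reason
  let hits := (patternPriority.filter (fun pi => PySem.Str.isIn pi.1 r)).map Prod.snd
  match PySem.List.min? hits (fun x => x) with
  | none => "Active"                     -- hits empty ⇒ the 'else Active' arm of Source B's conditional
  | some i => categories.getD i "Active" -- CATEGORIES[i]; exact: i is a stored priority, always 0 ≤ i < 9

-- ===== PRECONDITION & SPEC =====
def Spec_map_closure_reason_category (reason : String) (out : String) : Prop := out = map_closure_reason_category_alt reason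
instance (reason : String) (out : String) : Decidable (Spec_map_closure_reason_category reason out) := by unfold Spec_map_closure_reason_category; infer_instance

-- ===== CLAIM (what is proved, stated in full; the proofs are below) =====
def Claim_equal_map_closure_reason_category : Prop := ∀ (reason : String), Dom_map_closure_reason_category reason → Spec_map_closure_reason_category reason (map_closure_reason_category reason)

-- ===== LEMMAS AND PROOFS =====

-- proof-side grouped view of the table: (patterns per category) in A's branch order
def groupedPats : List (List String) :=
  [["changed school", "moved", "workplace", "service area", "family structure"],
   ["time constraint", "time"],
   ["lost contact"],
   ["health", "covid", "deceased"],
   ["successful", "graduated"],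
   ["incompatible", "expectations"],
   ["infraction", "safety"],
   ["agency", "partnership"],
   ["lost interest", "severity of challenges"]]

-- flatten the grouped table into (pattern, priority) starting at priority k
def flatp : List (List String) → Nat → List (String × Nat)
  | [], _ => []
  | ps :: t, k => ps.map (fun p => (p, k)) ++ flatp t (k + 1)

-- A's elif chain, indexed: branch j returns categories.getD (k+j)
def chainIdx (r : String) : List (List String) → Nat → String
  | [], _ => "Active"
  | ps :: t, k => if ps.any (fun p => PySem.Str.isIn p r) then categories.getD k "Active" else chainIdx r t (k + 1)

theorem flatp_grouped : flatp groupedPats 0 = patternPriority := by decide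

theorem flatp_snd_ge : ∀ (t : List (List String)) (k : Nat), ∀ x ∈ flatp t k, k ≤ x.2 := by
  intro t
  induction t with
  | nil => intro k x hx; simp [flatp] at hx
  | cons ps t ih =>
      intro k x hx
      simp only [flatp, List.mem_append, List.mem_map] at hx
      rcases hx with ⟨p, _, rfl⟩ | hx
      · exact Nat.le_refl k
      · exact Nat.le_of_succ_le (ih (k + 1) x hx)

theorem minmatch_eq_chain : ∀ (t : List (List String)) (k : Nat) (r : String),
    (match PySem.List.min? (((flatp t k).filter (fun pi => PySem.Str.isIn pi.1 r)).map Prod.snd) (fun x => x) with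
     | none => "Active"
     | some i => categories.getD i "Active") = chainIdx r t k := by
  intro t
  induction t with
  | nil => intro k r; simp [flatp, chainIdx, PySem.List.min?]
  | cons ps t ih =>
      intro k r
      simp only [flatp, chainIdx, List.filter_append, List.map_append]
      have hmapfilt : (ps.map (fun p => (p, k))).filter (fun pi => PySem.Str.isIn pi.1 r)
          = (ps.filter (fun p => PySem.Str.isIn p r)).map (fun p => (p, k)) := by
        induction ps with
        | nil => rfl
        | cons q qs ihq =>
            simp only [List.map_cons, List.filter_cons, ihq]
            cases hb : PySem.Str.isIn q r <;> simp_all [PySem.Str.isIn]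
      rw [hmapfilt]
      by_cases h : ps.any (fun p => PySem.Str.isIn p r) = true
      · -- some pattern of this category matches: the minimum is k
        simp only [h, if_true]
        rcases List.any_eq_true.mp h with ⟨q, hq, hqr⟩
        have hk : k ∈ ((ps.filter (fun p => PySem.Str.isIn p r)).map (fun p => (p, k))).map Prod.snd
            ++ ((flatp t (k + 1)).filter (fun pi => PySem.Str.isIn pi.1 r)).map Prod.snd := by
          apply List.mem_append_left
          simp only [List.map_map, List.mem_map]
          exact ⟨q, List.mem_filter.mpr ⟨hq, hqr⟩, rfl⟩
        have hall : ∀ m ∈ ((ps.filter (fun p => PySem.Str.isIn p r)).map (fun p => (p, k))).map Prod.snd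
              ++ ((flatp t (k + 1)).filter (fun pi => PySem.Str.isIn pi.1 r)).map Prod.snd, k ≤ m := by
          intro m hm
          rcases List.mem_append.mp hm with hm1 | hm2
          · simp only [List.map_map, List.mem_map, Function.comp] at hm1
            rcases hm1 with ⟨p, _, rfl⟩
            exact Nat.le_refl k
          · simp only [List.mem_map] at hm2
            rcases hm2 with ⟨x, hx, rfl⟩
            exact Nat.le_of_succ_le (flatp_snd_ge t (k + 1) x (List.mem_filter.mp hx).1)
        have hmin : PySem.List.min?
            (((ps.filter (fun p => PySem.Str.isIn p r)).map (fun p => (p, k))).map Prod.snd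
              ++ ((flatp t (k + 1)).filter (fun pi => PySem.Str.isIn pi.1 r)).map Prod.snd)
            (fun x => x) = some k := by
          rcases hmem : PySem.List.min? _ (fun x => x) with _ | m
          · rw [(PySem.List.min?_eq_none_iff _ _).mp hmem] at hk
            exact absurd hk (List.not_mem_nil)
          · have hle : m ≤ k := PySem.List.min?_isMin hmem k hk
            have hge : k ≤ m := hall m (PySem.List.min?_mem hmem)
            exact congrArg some (Nat.le_antisymm hle hge)
        rw [hmin]
      · -- no pattern of this category matches: the first block filters away, recurse
        have hnone : ps.filter (fun p => PySem.Str.isIn p r) = [] := by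
          rw [List.filter_eq_nil_iff]
          intro q hq
          exact fun hqr => h (List.any_eq_true.mpr ⟨q, hq, hqr⟩)
        simp only [h, hnone, List.map_nil, List.nil_append]
        exact ih (k + 1) r

-- ===== VERDICT (by name: the statement is the Claim_ definition above) =====
theorem map_closure_reason_category_spec : Claim_equal_map_closure_reason_category := by
  intro reason _
  unfold Spec_map_closure_reason_category map_closure_reason_category map_closure_reason_category_alt
  rw [← flatp_grouped, minmatch_eq_chain]
  simp only [groupedPats, chainIdx, categories, List.any_cons, List.any_nil, Bool.or_false,
    Bool.or_assoc, List.getD, List.getElem?_cons_zero, List.getElem?_cons_succ, Option.getD_some]
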